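-- pv_equiv track=rewrite | github.com/ohiofi/EliteCybersecurityUnit | MrRileysEncryptionAlgos/main.py | rileySuperSecretEncrypt03
-- ===== SOURCE A (Python) =====
-- def rileySuperSecretEncrypt03(word):
--     if len(word) >= 64 or len(word) == 0:
--         return word
--     substitutions = {"a":"ei", "e":"io", "i":"ou", "o":"ua", "u":"ae", "r":"st", "s":"tr", "t":"rs"}
--     result = word[-1]
--     for eachLetter in word:
--         if eachLetter in substitutions:
--             result += substitutions[eachLetter]
--         else:
--             result += eachLetter
--     return rileySuperSecretEncrypt03(result) + word[0]
-- ===== SOURCE B (Python) =====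
-- def rileySuperSecretEncrypt03(word):
--     substitutions = {"a":"ei", "e":"io", "i":"ou", "o":"ua", "u":"ae", "r":"st", "s":"tr", "t":"rs"}
--     cur = word
--     firsts = []
--     while len(cur) != 0 and len(cur) < 64:
--         firsts.append(cur[0])
--         cur = cur[-1] + "".join(substitutions.get(ch, ch) for ch in cur)
--     return cur + "".join(reversed(firsts))
-- ===== Notes on version B (the rewrite author's own statement) =====
-- stated objective: alternative
-- what changed: Replaces A's recursion (recurse on the expanded string, append word[0] on return) by an explicit while-loop that keeps the current string and a list of collected first characters, appending the reversed list once at the end.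
import Mathlib
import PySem

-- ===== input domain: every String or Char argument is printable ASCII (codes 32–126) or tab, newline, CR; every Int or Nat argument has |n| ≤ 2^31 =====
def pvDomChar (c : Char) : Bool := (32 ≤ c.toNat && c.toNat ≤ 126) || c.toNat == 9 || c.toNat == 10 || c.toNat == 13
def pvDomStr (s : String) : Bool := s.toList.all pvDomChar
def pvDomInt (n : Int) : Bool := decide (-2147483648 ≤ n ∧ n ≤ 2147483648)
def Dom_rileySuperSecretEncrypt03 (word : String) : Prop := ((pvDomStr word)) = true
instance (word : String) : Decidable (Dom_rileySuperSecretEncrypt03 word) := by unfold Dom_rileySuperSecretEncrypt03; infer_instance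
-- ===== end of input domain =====

-- B replaces A's recursion by an explicit while-loop collecting the first characters; objective: alternative decomposition (not faster).

-- ===== PORT A =====
-- A's substitution dict (Python dict of single-char string keys; Char keys here, exact on the string's characters)
def pvSubstDictA : PySem.Dict Char String :=
  PySem.Dict.ofList [('a', "ei"), ('e', "io"), ('i', "ou"), ('o', "ua"),
                     ('u', "ae"), ('r', "st"), ('s', "tr"), ('t', "rs")]

-- the body of A's for-loop: 'if eachLetter in substitutions: … else: …'
def pvSubA (c : Char) : List Char :=
  match PySem.Dict.get? pvSubstDictA c with
  | some s => s.toList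
  | none => [c]

theorem pvSubstDictA_items : pvSubstDictA.items =
    [('a', "ei"), ('e', "io"), ('i', "ou"), ('o', "ua"),
     ('u', "ae"), ('r', "st"), ('s', "tr"), ('t', "rs")] := by decide

theorem pvSubA_len (c : Char) : 1 ≤ (pvSubA c).length := by
  unfold pvSubA
  cases h : PySem.Dict.get? pvSubstDictA c with
  | none => simp
  | some s =>
      simp only [PySem.Dict.get?, Option.map_eq_some_iff] at h
      obtain ⟨p, hfind, h2⟩ := h
      have hmem := List.mem_of_find?_eq_some hfind
      rw [pvSubstDictA_items] at hmem
      subst h2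
      simp only [List.mem_cons, List.not_mem_nil, or_false] at hmem
      rcases hmem with rfl|rfl|rfl|rfl|rfl|rfl|rfl|rfl <;> simp

theorem pvFoldA_len (l acc : List Char) :
    acc.length + l.length ≤ (l.foldl (fun a c => a ++ pvSubA c) acc).length := by
  induction l generalizing acc with
  | nil => simp
  | cons c t ih =>
      simp only [List.foldl_cons, List.length_cons]
      have h1 := ih (acc ++ pvSubA c)
      have h2 : (acc ++ pvSubA c).length = acc.length + (pvSubA c).length :=
        List.length_append
      have h3 := pvSubA_len c
      omega

-- 'result = word[-1]; for eachLetter in word: result += …'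
def pvExpandA (l : List Char) : List Char :=
  l.foldl (fun acc c => acc ++ pvSubA c) [l.getLast!]

-- literal transliteration of A's recursion, over List Char
def pvEncA (l : List Char) : List Char :=
  if l.length ≥ 64 ∨ l.length = 0 then l
  else
    pvEncA (pvExpandA l) ++ [l.head!]
termination_by 64 - l.length
decreasing_by
  have h := pvFoldA_len l [l.getLast!]
  simp only [List.length_cons, List.length_nil] at h
  simp only [pvExpandA]
  omega

def rileySuperSecretEncrypt03 (word : String) : String :=
  String.ofList (pvEncA word.toList)

-- ===== PORT B =====
def pvSubstDictB : PySem.Dict Char String :=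
  PySem.Dict.ofList [('a', "ei"), ('e', "io"), ('i', "ou"), ('o', "ua"),
                     ('u', "ae"), ('r', "st"), ('s', "tr"), ('t', "rs")]

-- substitutions.get(ch, ch)
def pvSubB (c : Char) : List Char :=
  (PySem.Dict.getD pvSubstDictB c (String.singleton c)).toList

theorem pvSubB_len (c : Char) : 1 ≤ (pvSubB c).length := by
  unfold pvSubB
  rw [PySem.Dict.getD_eq_get?_getD]
  cases h : PySem.Dict.get? pvSubstDictB c with
  | none => simp [String.singleton]
  | some s =>
      simp only [PySem.Dict.get?, Option.map_eq_some_iff] at h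
      obtain ⟨p, hfind, h2⟩ := h
      have hmem := List.mem_of_find?_eq_some hfind
      have hitems : pvSubstDictB.items = pvSubstDictA.items := rfl
      rw [hitems, pvSubstDictA_items] at hmem
      subst h2
      simp only [List.mem_cons, List.not_mem_nil, or_false] at hmem
      rcases hmem with rfl|rfl|rfl|rfl|rfl|rfl|rfl|rfl <;> simp

theorem pvFlatB_len (l : List Char) : l.length ≤ (l.flatMap pvSubB).length := by
  induction l with
  | nil => simp
  | cons c t ih =>
      have := pvSubB_len c
      simp only [List.flatMap_cons, List.length_append, List.length_cons]
      omega

-- cur[-1] + "".join(substitutions.get(ch, ch) for ch in cur)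
def pvStepB (cur : List Char) : List Char :=
  cur.getLast! :: cur.flatMap pvSubB

-- the while-loop of B: firsts collected by append, joined reversed at the end
def pvLoopB (cur firsts : List Char) : List Char :=
  if cur.length ≠ 0 ∧ cur.length < 64 then
    pvLoopB (pvStepB cur) (firsts ++ [cur.head!])
  else
    cur ++ firsts.reverse
termination_by 64 - cur.length
decreasing_by
  have h := pvFlatB_len cur
  simp only [pvStepB, List.length_cons]
  omega

def rileySuperSecretEncrypt03_alt (word : String) : String :=
  String.ofList (pvLoopB word.toList [])

-- ===== PRECONDITION & SPEC =====
def Spec_rileySuperSecretEncrypt03 (word : String) (out : String) : Prop := out = rileySuperSecretEncrypt03_alt word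
instance (word : String) (out : String) : Decidable (Spec_rileySuperSecretEncrypt03 word out) := by unfold Spec_rileySuperSecretEncrypt03; infer_instance

-- ===== CLAIM (what is proved, stated in full; the proofs are below) =====
def Claim_equal_rileySuperSecretEncrypt03 : Prop := ∀ (word : String), Dom_rileySuperSecretEncrypt03 word → Spec_rileySuperSecretEncrypt03 word (rileySuperSecretEncrypt03 word)

-- ===== LEMMAS AND PROOFS =====

-- the two ports perform the same letter substitution
theorem pvSub_eq : pvSubA = pvSubB := by
  funext c
  unfold pvSubA pvSubB
  rw [PySem.Dict.getD_eq_get?_getD]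
  have hd : PySem.Dict.get? pvSubstDictA c = PySem.Dict.get? pvSubstDictB c := rfl
  rw [hd]
  cases PySem.Dict.get? pvSubstDictB c with
  | none => simp [String.singleton]
  | some s => simp

-- A's expanded string (one level) is B's step
theorem pvStep_eq (l : List Char) :
    pvExpandA l = pvStepB l := by
  unfold pvExpandA
  rw [PySem.List.foldl_append_eq_flatMap, pvSub_eq]
  rfl

-- loop invariant: B's loop computes A's recursion followed by the reversed collected firsts
theorem pvLoop_encA (l firsts : List Char) :
    pvLoopB l firsts = pvEncA l ++ firsts.reverse := by
  unfold pvLoopB pvEncA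
  by_cases h : l.length ≠ 0 ∧ l.length < 64
  · have h' : ¬ (l.length ≥ 64 ∨ l.length = 0) := by omega
    rw [if_pos h, if_neg h']
    rw [pvStep_eq, pvLoop_encA (pvStepB l) (firsts ++ [l.head!])]
    simp
  · have h' : l.length ≥ 64 ∨ l.length = 0 := by omega
    rw [if_neg h, if_pos h']
termination_by 64 - l.length
decreasing_by
  have := pvFlatB_len l
  simp only [pvStepB, List.length_cons]
  omega

-- ===== VERDICT (by name: the statement is the Claim_ definition above) =====
theorem rileySuperSecretEncrypt03_spec : Claim_equal_rileySuperSecretEncrypt03 := by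
  intro word _
  unfold Spec_rileySuperSecretEncrypt03 rileySuperSecretEncrypt03 rileySuperSecretEncrypt03_alt
  rw [pvLoop_encA]
  simp
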